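-- pv_equiv track=rewrite | github.com/Hercerthe/2110101-Comp-prog | Grader/08_Dict_xx/08_Dict_24.py | text2keys
-- ===== SOURCE A (Python) =====
-- button = {"2":"ABC","3":"DEF","4":"GHI","5":"JKL","6":"MNO","7":"PQRS","8":"TUV","9":"WXYZ","0":" "}
--
-- time = {1:"ADGJMPTW ", 2:"BEHKNQUX", 3:"CFILORVY", 4:"SZ"}
--
-- def text2keys(text):
--     text = [i.upper() for i in text if i.isalpha() or i.isspace()]
--     for i in range(len(text)) :
--         for e in button :
--             if text[i] in button[e] :
--                 for r in time :
--                     if text[i] in time[r] :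
--                         text[i] = e*r
--     return " ".join(text)
-- ===== SOURCE B (Python) =====
-- _KEYS = {' ': '0',
--          'A': '2',   'B': '22',  'C': '222',
--          'D': '3',   'E': '33',  'F': '333',
--          'G': '4',   'H': '44',  'I': '444',
--          'J': '5',   'K': '55',  'L': '555',
--          'M': '6',   'N': '66',  'O': '666',
--          'P': '7',   'Q': '77',  'R': '777', 'S': '7777',
--          'T': '8',   'U': '88',  'V': '888',
--          'W': '9',   'X': '99',  'Y': '999', 'Z': '9999'}
--
-- def text2keys(text):
--     # single pass with an accumulator: look each kept character up in a
--     # literal table and append it with a separator; no intermediate list,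
--     # no join, no nested scans over button/time
--     res = ""
--     sep = ""
--     for c in text:
--         if c.isalpha() or c.isspace():
--             u = c.upper()
--             res += sep + _KEYS.get(u, u)
--             sep = " "
--     return res
-- ===== Notes on version B (the rewrite author's own statement) =====
-- stated objective: faster
-- what changed: B replaces A's build-list / mutate-each-cell-via-nested-button-and-time-scans / join pipeline by a single pass over the text with a string accumulator and a literal char->keystrokes table looked up once per kept character.
import Mathlib
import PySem

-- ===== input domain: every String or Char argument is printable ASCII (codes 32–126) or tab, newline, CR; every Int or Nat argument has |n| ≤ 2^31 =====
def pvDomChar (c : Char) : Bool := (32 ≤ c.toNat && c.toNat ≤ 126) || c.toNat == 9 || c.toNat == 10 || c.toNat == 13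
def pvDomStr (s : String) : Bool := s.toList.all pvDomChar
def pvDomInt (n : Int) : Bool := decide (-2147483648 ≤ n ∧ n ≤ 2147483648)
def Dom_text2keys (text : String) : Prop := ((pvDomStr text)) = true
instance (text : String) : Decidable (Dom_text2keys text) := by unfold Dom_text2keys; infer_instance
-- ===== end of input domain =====

set_option maxRecDepth 20000
set_option maxHeartbeats 2000000


-- B replaces A's build-list / nested-scan-mutation / join pipeline by a single pass
-- with a string accumulator and a literal char→keystrokes table (objective: faster, constant factor).

-- ===== PORT A =====
-- the module-level dicts of A (association lists in insertion order)
def pvButton : List (Char × List Char) :=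
  [('2', ['A','B','C']), ('3', ['D','E','F']), ('4', ['G','H','I']), ('5', ['J','K','L']),
   ('6', ['M','N','O']), ('7', ['P','Q','R','S']), ('8', ['T','U','V']), ('9', ['W','X','Y','Z']),
   ('0', [' '])]

def pvTime : List (Nat × List Char) :=
  [(1, ['A','D','G','J','M','P','T','W',' ']), (2, ['B','E','H','K','N','Q','U','X']),
   (3, ['C','F','I','L','O','R','V','Y']), (4, ['S','Z'])]

-- the body of A's outer loop for one position: `for e in button: if text[i] in button[e]:
-- for r in time: if text[i] in time[r]: text[i] = e*r`, with the state = current text[i]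
def pvAStep (x : List Char) : List Char :=
  pvButton.foldl (fun x p =>
    if PySem.Chars.isIn x p.2 then
      pvTime.foldl (fun x q => if PySem.Chars.isIn x q.2 then (List.replicate q.1 [p.1]).flatten else x) x
    else x) x

def pvAList (text : String) : List (List Char) :=
  (text.toList.filter (fun c => PySem.Chars.isalpha c || PySem.Chars.isspace c)).map
    (fun c => [PySem.Chars.upperChar c])

def text2keys (text : String) : String :=
  -- text = [i.upper() for i in text if i.isalpha() or i.isspace()], then
  -- for i in range(len(text)): … text[i] = e*r  (pvAList = the filtered/uppercased list)
  String.ofList (PySem.Chars.join [' ']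
    ((List.range (pvAList text).length).foldl
      (fun t i => t.set i (pvAStep (t.getD i []))) (pvAList text)))

-- ===== PORT B =====
-- B's literal table _KEYS (a dict literal; unique keys, insertion order)
def pvKeys : PySem.Dict Char (List Char) := PySem.Dict.ofList
  [(' ', ['0']),
   ('A', ['2']), ('B', ['2','2']), ('C', ['2','2','2']),
   ('D', ['3']), ('E', ['3','3']), ('F', ['3','3','3']),
   ('G', ['4']), ('H', ['4','4']), ('I', ['4','4','4']),
   ('J', ['5']), ('K', ['5','5']), ('L', ['5','5','5']),
   ('M', ['6']), ('N', ['6','6']), ('O', ['6','6','6']),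
   ('P', ['7']), ('Q', ['7','7']), ('R', ['7','7','7']), ('S', ['7','7','7','7']),
   ('T', ['8']), ('U', ['8','8']), ('V', ['8','8','8']),
   ('W', ['9']), ('X', ['9','9']), ('Y', ['9','9','9']), ('Z', ['9','9','9','9'])]

def text2keys_alt (text : String) : String :=
  -- res = ""; sep = ""; for c in text: if c.isalpha() or c.isspace():
  --   u = c.upper(); res += sep + _KEYS.get(u, u); sep = " "
  -- state = (res, sep)
  String.ofList (text.toList.foldl
    (fun st c =>
      if PySem.Chars.isalpha c || PySem.Chars.isspace c then
        let u := PySem.Chars.upperChar c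
        (st.1 ++ st.2 ++ pvKeys.getD u [u], [' '])
      else st)
    (([] : List Char), ([] : List Char))).1

-- ===== PRECONDITION & SPEC =====
def Spec_text2keys (text : String) (out : String) : Prop := out = text2keys_alt text
instance (text : String) (out : String) : Decidable (Spec_text2keys text out) := by unfold Spec_text2keys; infer_instance

-- ===== CLAIM (what is proved, stated in full; the proofs are below) =====
def Claim_equal_text2keys : Prop := ∀ (text : String), Dom_text2keys text → Spec_text2keys text (text2keys text)

-- ===== LEMMAS AND PROOFS =====

-- abbreviations for the proofs
def pvP (c : Char) : Bool := PySem.Chars.isalpha c || PySem.Chars.isspace c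
def pvKey (c : Char) : List Char :=
  pvKeys.getD (PySem.Chars.upperChar c) [PySem.Chars.upperChar c]
def pvBStep (st : List Char × List Char) (c : Char) : List Char × List Char :=
  if PySem.Chars.isalpha c || PySem.Chars.isspace c then
    let u := PySem.Chars.upperChar c
    (st.1 ++ st.2 ++ pvKeys.getD u [u], [' '])
  else st

-- A's index loop `for i in range(len(t)): t[i] = f(t[i])` is a map
theorem pv_foldl_set_take {α : Type} (f : α → α) (d : α) (l : List α) :
    ∀ k, k ≤ l.length →
      (List.range k).foldl (fun t i => t.set i (f (t.getD i d))) l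
        = (l.take k).map f ++ l.drop k := by
  intro k
  induction k with
  | zero => simp
  | succ k ih =>
    intro hk
    have hk' : k < l.length := hk
    rw [List.range_succ, List.foldl_append, ih (Nat.le_of_lt hk')]
    simp only [List.foldl_cons, List.foldl_nil]
    have hlen : ((l.take k).map f).length = k := by
      simp [List.length_take, Nat.min_eq_left (Nat.le_of_lt hk')]
    have hdrop : l.drop k = l[k] :: l.drop (k + 1) := by
      rw [List.drop_eq_getElem_cons hk']
    have hget : ((l.take k).map f ++ l.drop k).getD k d = l[k] := by
      rw [hdrop, List.getD_eq_getElem?_getD, List.getElem?_append_right (by omega), hlen,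
        Nat.sub_self]
      rfl
    have htake : (l.take (k + 1)).map f = (l.take k).map f ++ [f l[k]] := by
      rw [List.take_add_one, List.getElem?_eq_getElem hk', List.map_append]
      rfl
    have hset : ((l.take k).map f ++ l.drop k).set k (f l[k])
        = (l.take (k + 1)).map f ++ l.drop (k + 1) := by
      rw [hdrop, htake, List.set_append, hlen, if_neg (lt_irrefl k), Nat.sub_self,
        List.set_cons_zero, List.append_assoc, List.singleton_append]
    rw [hget, hset]

theorem pv_foldl_set_map {α : Type} (f : α → α) (d : α) (l : List α) :
    (List.range l.length).foldl (fun t i => t.set i (f (t.getD i d))) l = l.map f := by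
  simpa using pv_foldl_set_take f d l l.length (Nat.le_refl _)

-- join with separator " " as a flatMap after the first piece
theorem pv_join_cons (x : List Char) (xs : List (List Char)) :
    PySem.Chars.join [' '] (x :: xs) = x ++ xs.flatMap (fun y => ' ' :: y) := by
  induction xs generalizing x with
  | nil => simp [PySem.Chars.join, List.intercalate]
  | cons y ys ih =>
    rw [PySem.Chars.join_cons_cons, ih y]
    simp

-- B's fold once the separator has become " "
theorem pv_fold_tail (l : List Char) : ∀ res : List Char,
    (l.foldl pvBStep (res, [' '])).1
      = res ++ ((l.filter pvP).map pvKey).flatMap (fun y => ' ' :: y) := by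
  induction l with
  | nil => intro res; simp
  | cons c l ih =>
    intro res
    simp only [List.foldl_cons, pvBStep, List.filter_cons]
    by_cases h : pvP c
    · rw [if_pos (by simpa [pvP] using h), if_pos h, ih]
      simp [pvKey, List.append_assoc]
    · rw [if_neg (by simpa [pvP] using h), if_neg h, ih]

-- B's fold from the initial empty separator computes the joined string
theorem pv_fold_main (l : List Char) :
    (l.foldl pvBStep (([] : List Char), ([] : List Char))).1
      = PySem.Chars.join [' '] ((l.filter pvP).map pvKey) := by
  induction l with
  | nil => simp [PySem.Chars.join, List.intercalate]
  | cons c l ih =>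
    simp only [List.foldl_cons, pvBStep, List.filter_cons]
    by_cases h : pvP c
    · rw [if_pos (by simpa [pvP] using h), if_pos h, List.map_cons, pv_join_cons, pv_fold_tail]
      simp [pvKey]
    · rw [if_neg (by simpa [pvP] using h), if_neg h, ih]

-- per-character agreement over the whole domain alphabet (codes 0–126; tab/newline/CR ⊆ 0–126)
theorem pv_char_agree : ∀ n : Nat, n < 127 →
    (PySem.Chars.isalpha (Char.ofNat n) || PySem.Chars.isspace (Char.ofNat n)) = true →
    pvAStep [PySem.Chars.upperChar (Char.ofNat n)] = pvKey (Char.ofNat n) := by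
  decide

-- ===== VERDICT (by name: the statement is the Claim_ definition above) =====
theorem text2keys_spec : Claim_equal_text2keys := by
  intro text hdom
  unfold Spec_text2keys text2keys text2keys_alt pvAList
  rw [pv_foldl_set_map pvAStep []]
  have hB : (text.toList.foldl
      (fun st c =>
        if PySem.Chars.isalpha c || PySem.Chars.isspace c then
          (st.1 ++ st.2 ++ pvKeys.getD (PySem.Chars.upperChar c) [PySem.Chars.upperChar c], [' '])
        else st)
      (([] : List Char), ([] : List Char))).1
      = PySem.Chars.join [' '] ((text.toList.filter pvP).map pvKey) := pv_fold_main text.toList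
  rw [hB, List.map_map]
  refine congrArg String.ofList (congrArg (PySem.Chars.join [' ']) ?_)
  unfold pvP
  apply List.map_congr_left
  intro c hc
  have hcmem : c ∈ text.toList := List.mem_of_mem_filter hc
  have hdc : pvDomChar c = true := (List.all_eq_true.mp hdom) c hcmem
  have hlt : c.toNat < 127 := by
    unfold pvDomChar at hdc
    simp only [Bool.or_eq_true, Bool.and_eq_true, decide_eq_true_eq, beq_iff_eq] at hdc
    omega
  have hp : (PySem.Chars.isalpha c || PySem.Chars.isspace c) = true := (List.mem_filter.mp hc).2
  have := pv_char_agree c.toNat hlt (by rw [Char.ofNat_toNat]; exact hp)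
  simpa [Char.ofNat_toNat] using this
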